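-- pv_equiv track=rewrite | github.com/Cutie-Poochi/grandfatherbot | grandfatherNonMainStuff.py | split_next_word
-- ===== SOURCE A (Python) =====
-- def remove_start_space(text: str):
--     count = 0
--     while count < len(text):
--         letter = text[count]
--         if letter != ' ' and letter != '\n':
--             break
--         count += 1
--     return text[count:]
--
-- def split_next_word(text: str):
--     text = remove_start_space(text)
--     count = 0
--     while count < len(text):
--         letter = text[count]
--         if letter == ' ' or letter == '\n':
--             break
--         count += 1
--     if count == len(text):
--         return text, ''
--     return text[:count], remove_start_space(text[count:])
-- ===== SOURCE B (Python) =====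
-- def split_next_word(text: str):
--     # One-pass 4-state automaton: 0 = leading whitespace, 1 = inside the first
--     # word, 2 = whitespace after the word, 3 = remainder. No slicing, no rescans.
--     state = 0
--     word = []
--     rest = []
--     for c in text:
--         ws = (c == ' ' or c == '\n')
--         if state == 0:
--             if not ws:
--                 state = 1
--                 word.append(c)
--         elif state == 1:
--             if ws:
--                 state = 2
--             else:
--                 word.append(c)
--         elif state == 2:
--             if not ws:
--                 state = 3
--                 rest.append(c)
--         else:
--             rest.append(c)
--     return ''.join(word), ''.join(rest)
-- ===== Notes on version B (the rewrite author's own statement) =====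
-- stated objective: alternative
-- what changed: Replaces A's staged scans (strip helper, index-counting search, slicing, second strip) by a single left-to-right pass of a 4-state automaton that builds the word and the remainder character by character, never slicing or rescanning.
import Mathlib
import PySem

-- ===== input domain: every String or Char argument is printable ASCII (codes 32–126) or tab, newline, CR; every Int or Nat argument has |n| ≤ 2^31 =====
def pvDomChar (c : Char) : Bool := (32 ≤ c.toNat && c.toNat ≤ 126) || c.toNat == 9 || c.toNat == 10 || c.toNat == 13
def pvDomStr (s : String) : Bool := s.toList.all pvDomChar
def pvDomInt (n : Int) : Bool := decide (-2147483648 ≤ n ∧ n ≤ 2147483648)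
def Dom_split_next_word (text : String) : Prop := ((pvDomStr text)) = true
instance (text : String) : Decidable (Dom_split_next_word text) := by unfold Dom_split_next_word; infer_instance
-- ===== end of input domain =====

-- B replaces A's staged scans (strip helper, index search, slices, second strip) by one
-- left-to-right pass of a 4-state automaton building word and remainder (alternative).

-- ===== PORT A =====
-- the 'while count < len(text)' loop of remove_start_space, returning the final count
def pvSkipWS (l : List Char) (count : Nat) : Nat :=
  if h : count < l.length then
    let letter := l[count]
    if letter ≠ ' ' ∧ letter ≠ '\n' then count
    else pvSkipWS l (count + 1)
  else count
termination_by l.length - count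

def removeStartSpace (l : List Char) : List Char := l.drop (pvSkipWS l 0)  -- text[count:], count ≥ 0

-- the 'while count < len(text)' loop of split_next_word, returning the final count
def pvFindWS (l : List Char) (count : Nat) : Nat :=
  if h : count < l.length then
    let letter := l[count]
    if letter = ' ' ∨ letter = '\n' then count
    else pvFindWS l (count + 1)
  else count
termination_by l.length - count

def split_next_word (text : String) : String × String :=
  let t := removeStartSpace text.toList
  let count := pvFindWS t 0
  if count = t.length then (String.ofList t, "")
  else (String.ofList (t.take count), String.ofList (removeStartSpace (t.drop count)))  -- text[:count] and text[count:], in-range slices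

-- ===== PORT B =====
def pvIsWS (c : Char) : Bool := c == ' ' || c == '\n'  -- ws = (c == ' ' or c == '\n')

-- one step of the automaton: state 0 leading ws, 1 in word, 2 ws after word, 3 remainder
def pvStep (st : Nat × List Char × List Char) (c : Char) : Nat × List Char × List Char :=
  match st with
  | (0, w, r) => if pvIsWS c then (0, w, r) else (1, w ++ [c], r)
  | (1, w, r) => if pvIsWS c then (2, w, r) else (1, w ++ [c], r)
  | (2, w, r) => if pvIsWS c then (2, w, r) else (3, w, r ++ [c])
  | (s, w, r) => (s, w, r ++ [c])

def split_next_word_alt (text : String) : String × String :=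
  let st := text.toList.foldl pvStep (0, [], [])   -- the for loop over text
  (String.ofList st.2.1, String.ofList st.2.2)     -- ''.join(word), ''.join(rest)

-- ===== PRECONDITION & SPEC =====
def Spec_split_next_word (text : String) (out : String × String) : Prop := out = split_next_word_alt text
instance (text : String) (out : String × String) : Decidable (Spec_split_next_word text out) := by unfold Spec_split_next_word; infer_instance

-- ===== CLAIM (what is proved, stated in full; the proofs are below) =====
def Claim_equal_split_next_word : Prop := ∀ (text : String), Dom_split_next_word text → Spec_split_next_word text (split_next_word text)

-- ===== LEMMAS AND PROOFS =====
theorem pvIsWS_iff (c : Char) : pvIsWS c = true ↔ (c = ' ' ∨ c = '\n') := by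
  simp [pvIsWS]

theorem pvSkipWS_drop (l : List Char) (count : Nat) :
    l.drop (pvSkipWS l count) = (l.drop count).dropWhile pvIsWS := by
  fun_induction pvSkipWS l count with
  | case1 count h letter hb =>
      rw [List.drop_eq_getElem_cons h, List.dropWhile_cons]
      have hws : pvIsWS l[count] = false := by
        rcases hb with ⟨h1, h2⟩
        simp only [pvIsWS, Bool.or_eq_false_iff, beq_eq_false_iff_ne]
        exact ⟨h1, h2⟩
      simp [hws]
  | case2 count h letter hb ih =>
      have hws : pvIsWS l[count] = true := by
        rw [pvIsWS_iff]; by_contra hc; rw [not_or] at hc; exact hb hc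
      rw [List.drop_eq_getElem_cons h, List.dropWhile_cons, hws]
      simpa using ih
  | case3 count h =>
      have : l.length ≤ count := Nat.le_of_not_lt h
      simp [List.drop_eq_nil_of_le this]

theorem pvFindWS_findIdx (l : List Char) (count : Nat) :
    pvFindWS l count = count + (l.drop count).findIdx pvIsWS := by
  fun_induction pvFindWS l count with
  | case1 count h letter hb =>
      have hws : pvIsWS l[count] = true := (pvIsWS_iff _).mpr hb
      rw [List.drop_eq_getElem_cons h, List.findIdx_cons, hws]
      simp
  | case2 count h letter hb ih =>
      have hws : pvIsWS l[count] = false := by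
        by_contra hc
        exact hb ((pvIsWS_iff _).mp (by simpa using hc))
      rw [List.drop_eq_getElem_cons h, List.findIdx_cons, hws]
      simp only [cond_false]
      omega
  | case3 count h =>
      have : l.length ≤ count := Nat.le_of_not_lt h
      simp [List.drop_eq_nil_of_le this]

theorem removeStartSpace_eq (m : List Char) :
    removeStartSpace m = m.dropWhile pvIsWS := by
  simpa [removeStartSpace] using pvSkipWS_drop m 0

theorem take_findIdx_eq_takeWhile (l : List Char) :
    l.take (l.findIdx pvIsWS) = l.takeWhile (fun c => !pvIsWS c) := by
  induction l with
  | nil => simp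
  | cons c l ih =>
      rw [List.findIdx_cons, List.takeWhile_cons]
      cases h : pvIsWS c <;> simp [ih]

theorem drop_findIdx_eq_dropWhile (l : List Char) :
    l.drop (l.findIdx pvIsWS) = l.dropWhile (fun c => !pvIsWS c) := by
  induction l with
  | nil => simp
  | cons c l ih =>
      rw [List.findIdx_cons, List.dropWhile_cons]
      cases h : pvIsWS c <;> simp [ih]

-- A computed in canonical dropWhile/takeWhile form
theorem split_next_word_canon (text : String) :
    split_next_word text =
      (String.ofList ((text.toList.dropWhile pvIsWS).takeWhile (fun c => !pvIsWS c)),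
       String.ofList (((text.toList.dropWhile pvIsWS).dropWhile (fun c => !pvIsWS c)).dropWhile pvIsWS)) := by
  show (let t := removeStartSpace text.toList
        let count := pvFindWS t 0
        if count = t.length then (String.ofList t, "")
        else (String.ofList (t.take count), String.ofList (removeStartSpace (t.drop count)))) = _
  simp only [removeStartSpace_eq]
  set s := text.toList.dropWhile pvIsWS with hs
  have hcount : pvFindWS s 0 = s.findIdx pvIsWS := by simpa using pvFindWS_findIdx s 0
  rw [hcount]
  by_cases hlen : s.findIdx pvIsWS = s.length
  · rw [if_pos hlen, ← take_findIdx_eq_takeWhile, ← drop_findIdx_eq_dropWhile, hlen,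
      List.take_length, List.drop_length, List.dropWhile_nil]
  · rw [if_neg hlen, ← take_findIdx_eq_takeWhile, ← drop_findIdx_eq_dropWhile]

-- the automaton from state 3: appends every remaining character to rest
theorem pvFold3 (l w r : List Char) :
    l.foldl pvStep (3, w, r) = (3, w, r ++ l) := by
  induction l generalizing r with
  | nil => simp
  | cons c l ih => simp [List.foldl_cons, pvStep, ih]

-- from state 2 (rest empty): rest becomes the remainder stripped of leading ws
theorem pvFold2 (l w : List Char) :
    ∃ st, l.foldl pvStep (2, w, []) = (st, w, l.dropWhile pvIsWS) := by
  induction l with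
  | nil => exact ⟨2, by simp⟩
  | cons c l ih =>
      cases h : pvIsWS c with
      | true =>
          obtain ⟨st, hst⟩ := ih
          exact ⟨st, by simp [List.foldl_cons, pvStep, h, hst]⟩
      | false =>
          exact ⟨3, by simp [List.foldl_cons, pvStep, h, pvFold3]⟩

-- from state 1: word grows by the leading non-ws run, rest as in state 2 afterwards
theorem pvFold1 (l w : List Char) :
    ∃ st, l.foldl pvStep (1, w, []) =
      (st, w ++ l.takeWhile (fun c => !pvIsWS c),
        (l.dropWhile (fun c => !pvIsWS c)).dropWhile pvIsWS) := by
  induction l generalizing w with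
  | nil => exact ⟨1, by simp⟩
  | cons c l ih =>
      cases h : pvIsWS c with
      | true =>
          obtain ⟨st, hst⟩ := pvFold2 l w
          exact ⟨st, by simp [List.foldl_cons, pvStep, h, hst]⟩
      | false =>
          obtain ⟨st, hst⟩ := ih (w ++ [c])
          refine ⟨st, ?_⟩
          simp [List.foldl_cons, pvStep, h, hst]

-- from the initial state: the full characterization of the automaton's run
theorem pvFold0 (l : List Char) :
    ∃ st, l.foldl pvStep (0, [], []) =
      (st, (l.dropWhile pvIsWS).takeWhile (fun c => !pvIsWS c),
        ((l.dropWhile pvIsWS).dropWhile (fun c => !pvIsWS c)).dropWhile pvIsWS) := by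
  induction l with
  | nil => exact ⟨0, by simp⟩
  | cons c l ih =>
      cases h : pvIsWS c with
      | true =>
          obtain ⟨st, hst⟩ := ih
          exact ⟨st, by simp [List.foldl_cons, pvStep, h, hst]⟩
      | false =>
          obtain ⟨st, hst⟩ := pvFold1 l [c]
          refine ⟨st, ?_⟩
          simp [List.foldl_cons, pvStep, h, hst]

-- ===== VERDICT (by name: the statement is the Claim_ definition above) =====
theorem split_next_word_spec : Claim_equal_split_next_word := by
  intro text _
  unfold Spec_split_next_word
  rw [split_next_word_canon]
  show _ = (let st := text.toList.foldl pvStep (0, [], [])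
            (String.ofList st.2.1, String.ofList st.2.2))
  obtain ⟨st, hst⟩ := pvFold0 text.toList
  rw [hst]
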